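-- pv_equiv track=rewrite | github.com/remekozicki/ASD | do_egz_t2/zadania_wiki_wakacje/egz5b/egz5b/pg.py | DFS
-- ===== SOURCE A (Python) =====
-- def DFS(G,idx):
--
--     n = len(G)
--
--     visited = [False for i in range(n)]
--     # parents = [[None] for i in range(n)]
--
--     visited[idx] = True
--     if idx != 0:
--         rec_DFS(G,visited,0)
--     else:
--         rec_DFS(G,visited,1)
--
--     for i in range(n):
--         if not visited[i]:
--             return False
--
--     return True
--
-- def rec_DFS(G,visited,u):
--     visited[u] = True
--     for v in G[u]:
--         if not visited[v]:
--             rec_DFS(G,visited,v)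
-- ===== SOURCE B (Python) =====
-- def DFS(G, idx):
--     visited = [False] * len(G)
--     visited[idx] = True
--     start = 1 if idx == 0 else 0
--     visited[start] = True
--     stack = [start]
--     while stack:
--         u = stack.pop()
--         for v in G[u]:
--             if not visited[v]:
--                 visited[v] = True
--                 stack.append(v)
--     return all(visited)
-- ===== Notes on version B (the rewrite author's own statement) =====
-- stated objective: alternative
-- what changed: The recursive helper rec_DFS is replaced by an iterative worklist search with an explicit list-as-stack that marks vertices when they are pushed (the start vertex is pre-marked), and the final range-scan is replaced by all(visited).
import Mathlib
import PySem

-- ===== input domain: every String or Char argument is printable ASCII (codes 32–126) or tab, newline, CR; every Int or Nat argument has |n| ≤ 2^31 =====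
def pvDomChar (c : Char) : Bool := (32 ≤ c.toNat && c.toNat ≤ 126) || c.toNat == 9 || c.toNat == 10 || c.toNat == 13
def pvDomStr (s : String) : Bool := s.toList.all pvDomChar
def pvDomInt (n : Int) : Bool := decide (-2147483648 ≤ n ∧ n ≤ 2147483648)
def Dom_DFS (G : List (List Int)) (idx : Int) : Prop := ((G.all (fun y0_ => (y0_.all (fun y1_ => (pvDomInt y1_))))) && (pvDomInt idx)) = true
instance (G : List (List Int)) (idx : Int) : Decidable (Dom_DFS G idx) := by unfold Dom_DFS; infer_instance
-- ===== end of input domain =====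

-- B replaces the recursive helper by an iterative worklist search with an explicit list-as-stack
-- that marks vertices when pushed, and replaces the final range loop by all(visited).

-- Python list index semantics on the admitted range: a negative index i means i + n
def pyIdx (n : Nat) (i : Int) : Nat := (if i < 0 then i + n else i).toNat

-- ===== PORT A =====
-- literal port of rec_DFS; the recursion is totalised by a fuel argument (G.length + 1 suffices on
-- Pre_, since each recursive call marks a previously unvisited vertex)
def recDFS (G : List (List Int)) (visited : List Bool) (u : Nat) (fuel : Nat) : List Bool :=
  match fuel with
  | 0 => visited
  | fuel + 1 =>
    (G.getD u []).foldl
      (fun vis v => if vis.getD (pyIdx G.length v) false then vis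
        else recDFS G vis (pyIdx G.length v) fuel)
      (visited.set u true)

def DFS (G : List (List Int)) (idx : Int) : Bool :=
  let n := G.length
  let visited := (List.replicate n false).set (pyIdx n idx) true
  let visited := if idx ≠ 0 then recDFS G visited 0 (n + 1) else recDFS G visited 1 (n + 1)
  (List.range n).all (fun i => visited.getD i false)

-- ===== PORT B =====
-- one pass of Source B's inner for-loop: mark-and-push every not-yet-visited neighbour.
-- An index access that would raise IndexError in Python (excluded by Pre_) is skipped here.
def pushRow (G : List (List Int)) (row : List Int) (p : List Bool × List Nat) : List Bool × List Nat :=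
  row.foldl
    (fun q v =>
      if pyIdx G.length v < G.length then
        if q.1.getD (pyIdx G.length v) false then q
        else (q.1.set (pyIdx G.length v) true, pyIdx G.length v :: q.2)
      else q) p

-- literal port of Source B's while-loop; fuel G.length + 1 bounds the iterations on Pre_
-- (every push marks a fresh vertex, so stack length + unvisited count drops each iteration)
def dfsLoop (G : List (List Int)) : Nat → List Bool → List Nat → List Bool
  | 0, vis, _ => vis
  | _ + 1, vis, [] => vis
  | fuel + 1, vis, u :: rest =>
    let p := pushRow G (G.getD u []) (vis, rest)
    dfsLoop G fuel p.1 p.2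

def DFS_alt (G : List (List Int)) (idx : Int) : Bool :=
  let n := G.length
  let start : Nat := if idx = 0 then 1 else 0
  (dfsLoop G (n + 1) (((List.replicate n false).set (pyIdx n idx) true).set start true)
    [start]).all (fun b => b)

-- ===== PRECONDITION & SPEC =====
-- one breadth step of the closure of wrapped in-range edges from the current vertex set:
-- a vertex's row is expanded when the search explores it (it is the start, or not the
-- pre-marked vertex k); used only to state Pre_, neither port computes with it
def reachStep (G : List (List Int)) (k s : Nat) (S : List Nat) : List Nat :=
  S.foldl (fun acc u =>
    if u = s ∨ u ≠ k then
      (G.getD u []).foldl (fun acc v =>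
        if pyIdx G.length v ∈ acc then acc else acc ++ [pyIdx G.length v]) acc
    else acc) S

-- the vertices the search explores: closure of {s} under wrapped edges avoiding k (except s)
def reachSet (G : List (List Int)) (k s : Nat) : List Nat :=
  (List.range (G.length + 1)).foldl (fun S _ => reachStep G k s S) [s]

-- Pre_ excludes exactly the inputs on which A raises: the empty graph and idx outside [-n, n)
-- (visited[idx] raises IndexError), idx = 0 on a 1-vertex graph (rec_DFS touches vertex 1),
-- and an out-of-range adjacency entry in a row the search explores (visited[v] raises).
def Pre_DFS (G : List (List Int)) (idx : Int) : Prop :=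
  1 ≤ G.length ∧ -(G.length : Int) ≤ idx ∧ idx < G.length ∧ (idx = 0 → 2 ≤ G.length) ∧
  ∀ w ∈ reachSet G (pyIdx G.length idx) (if idx = 0 then 1 else 0),
    (w = (if idx = 0 then 1 else 0) ∨ w ≠ pyIdx G.length idx) →
    ∀ v ∈ G.getD w [], -(G.length : Int) ≤ v ∧ v < G.length
instance (G : List (List Int)) (idx : Int) : Decidable (Pre_DFS G idx) := by
  unfold Pre_DFS; infer_instance

def pvWitness_DFS : List (List Int) × Int := ([[1], [0]], 0)

def Spec_DFS (G : List (List Int)) (idx : Int) (out : Bool) : Prop := out = DFS_alt G idx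
instance (G : List (List Int)) (idx : Int) (out : Bool) : Decidable (Spec_DFS G idx out) := by
  unfold Spec_DFS; infer_instance

-- ===== CLAIM (what is proved, stated in full; the proofs are below) =====
def Claim_equal_DFS : Prop :=
  ∀ (G : List (List Int)) (idx : Int), Dom_DFS G idx → Pre_DFS G idx → Spec_DFS G idx (DFS G idx)

-- ===== LEMMAS AND PROOFS =====

-- vertex w is marked in the visited list
def marked (vis : List Bool) (w : Nat) : Bool := vis.getD w false

-- all in-range neighbours of w are marked
def Closed (G : List (List Int)) (vis : List Bool) (w : Nat) : Prop :=
  ∀ v ∈ G.getD w [], pyIdx G.length v < G.length → marked vis (pyIdx G.length v) = true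

-- vertices the search explores and marks: s, and everything reachable from s along wrapped
-- edges whose source is explored (the source is s, or differs from the pre-marked vertex k)
inductive Rch (G : List (List Int)) (k s : Nat) : Nat → Prop
  | start : Rch G k s s
  | step : ∀ {u : Nat} {v : Int}, Rch G k s u → (u = s ∨ u ≠ k) → v ∈ G.getD u [] →
      Rch G k s (pyIdx G.length v)

lemma marked_set_mono (vis : List Bool) (u w : Nat) (h : marked vis w = true) :
    marked (vis.set u true) w = true := by
  simp only [marked, List.getD_eq_getElem?_getD, List.getElem?_set] at *
  split
  · next heq => subst heq; split <;> simp_all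
  · exact h

lemma marked_set_self (vis : List Bool) (u : Nat) (h : u < vis.length) :
    marked (vis.set u true) u = true := by
  simp [marked, List.getD_eq_getElem?_getD, h]

lemma marked_set_cases (vis : List Bool) (u w : Nat) (h : marked (vis.set u true) w = true) :
    w = u ∨ marked vis w = true := by
  simp only [marked, List.getD_eq_getElem?_getD, List.getElem?_set] at *
  by_cases hw : u = w
  · exact Or.inl hw.symm
  · simp [hw] at h; exact Or.inr h

lemma cf_set_lt (vis : List Bool) (u : Nat) (hu : u < vis.length)
    (hm : marked vis u = false) : (vis.set u true).count false < vis.count false := by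
  induction vis generalizing u with
  | nil => simp at hu
  | cons b t ih =>
    cases u with
    | zero =>
      cases b
      · simp [List.set]
      · simp [marked, List.getD] at hm
    | succ u =>
      have hu' : u < t.length := by simpa using hu
      have hm' : marked t u = false := by simpa [marked, List.getD] using hm
      have := ih u hu' hm'
      cases b <;> simp [List.set] <;> omega

lemma marked_replicate_set (n k w : Nat) :
    marked ((List.replicate n false).set k true) w = true ↔ (w = k ∧ k < n) := by
  simp only [marked, List.getD_eq_getElem?_getD, List.getElem?_set, List.length_replicate,
    List.getElem?_replicate]
  by_cases hw : k = w
  · subst hw; by_cases h : k < n <;> simp [h]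
  · constructor
    · intro h
      split at h
      · omega
      · split at h <;> simp_all
    · rintro ⟨h, -⟩; omega

lemma marked_lt (vis : List Bool) (w : Nat) (h : marked vis w = true) : w < vis.length := by
  rw [marked, List.getD_eq_getElem?_getD] at h
  by_contra hc
  rw [List.getElem?_eq_none (by omega)] at h
  simp at h

-- an out-of-range vertex has no row and cannot be marked: visiting it changes nothing
lemma recDFS_sink (G : List (List Int)) (vis : List Bool) (j fuel : Nat)
    (hlen : vis.length = G.length) (hj : G.length ≤ j) : recDFS G vis j fuel = vis := by
  cases fuel with
  | zero => rfl
  | succ fuel =>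
    have hrec : recDFS G vis j (fuel + 1) =
        (G.getD j []).foldl
          (fun vis v => if vis.getD (pyIdx G.length v) false then vis
            else recDFS G vis (pyIdx G.length v) fuel)
          (vis.set j true) := rfl
    rw [hrec, List.getD_eq_default G [] hj, List.set_eq_of_length_le (by omega),
      List.foldl_nil]

-- ===== characterisation of port A (recursive DFS) =====
lemma recDFS_post (G : List (List Int)) (k s : Nat) :
    ∀ (fuel : Nat) (vis : List Bool) (u : Nat),
      vis.length = G.length →
      marked vis k = true →
      (vis.set u true).count false < fuel →
      Rch G k s u → (u = s ∨ u ≠ k) → u < G.length →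
      (recDFS G vis u fuel).length = G.length ∧
      (recDFS G vis u fuel).count false ≤ (vis.set u true).count false ∧
      (∀ w, marked vis w = true → marked (recDFS G vis u fuel) w = true) ∧
      marked (recDFS G vis u fuel) u = true ∧
      (∀ w, marked (recDFS G vis u fuel) w = true → marked vis w = true ∨ Rch G k s w) ∧
      (∀ w, marked (recDFS G vis u fuel) w = true → marked vis w = false →
        Closed G (recDFS G vis u fuel) w) ∧
      Closed G (recDFS G vis u fuel) u := by
  intro fuel
  induction fuel with
  | zero =>
    intro vis u _ _ hcf _ _ _
    exact absurd hcf (Nat.not_lt_zero _)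
  | succ fuel ih =>
    intro vis u hlen hk hcf hr hok hlt
    have hrec : recDFS G vis u (fuel + 1) =
        (G.getD u []).foldl
          (fun vis v => if vis.getD (pyIdx G.length v) false then vis
            else recDFS G vis (pyIdx G.length v) fuel)
          (vis.set u true) := rfl
    have hcf' : (vis.set u true).count false ≤ fuel := by omega
    have inner : ∀ (l : List Int) (vis1 : List Bool),
        (∀ v ∈ l, v ∈ G.getD u []) →
        vis1.length = G.length →
        marked vis1 k = true →
        vis1.count false ≤ fuel →
        (l.foldl (fun vis v => if vis.getD (pyIdx G.length v) false then vis
            else recDFS G vis (pyIdx G.length v) fuel) vis1).length = G.length ∧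
        (l.foldl (fun vis v => if vis.getD (pyIdx G.length v) false then vis
            else recDFS G vis (pyIdx G.length v) fuel) vis1).count false ≤ vis1.count false ∧
        (∀ w, marked vis1 w = true → marked (l.foldl (fun vis v =>
            if vis.getD (pyIdx G.length v) false then vis else recDFS G vis (pyIdx G.length v) fuel) vis1) w = true) ∧
        (∀ w, marked (l.foldl (fun vis v => if vis.getD (pyIdx G.length v) false then vis
            else recDFS G vis (pyIdx G.length v) fuel) vis1) w = true →
            marked vis1 w = true ∨ Rch G k s w) ∧
        (∀ w, marked (l.foldl (fun vis v => if vis.getD (pyIdx G.length v) false then vis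
            else recDFS G vis (pyIdx G.length v) fuel) vis1) w = true → marked vis1 w = false →
            Closed G (l.foldl (fun vis v => if vis.getD (pyIdx G.length v) false then vis
              else recDFS G vis (pyIdx G.length v) fuel) vis1) w) ∧
        (∀ v ∈ l, pyIdx G.length v < G.length →
          marked (l.foldl (fun vis v => if vis.getD (pyIdx G.length v) false then vis
            else recDFS G vis (pyIdx G.length v) fuel) vis1) (pyIdx G.length v) = true) := by
      intro l
      induction l with
      | nil =>
        intro vis1 _ h1 _ _
        refine ⟨h1, le_refl _, fun w hw => hw, fun w hw => Or.inl hw, ?_, by simp⟩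
        intro w hw hw'
        rw [List.foldl_nil] at hw
        simp [hw] at hw'
      | cons v t iht =>
        intro vis1 hmem h1 h2 h3
        rw [List.foldl_cons]
        by_cases hv : marked vis1 (pyIdx G.length v) = true
        · have hv' : vis1.getD (pyIdx G.length v) false = true := hv
          rw [if_pos hv']
          obtain ⟨q1, q2, q3, q4, q5, q6⟩ :=
            iht vis1 (fun x hx => hmem x (by simp [hx])) h1 h2 h3
          refine ⟨q1, q2, q3, q4, q5, ?_⟩
          intro x hx hxlt
          rcases List.mem_cons.mp hx with h | h
          · subst h; exact q3 _ hv
          · exact q6 x h hxlt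
        · have hv' : ¬ vis1.getD (pyIdx G.length v) false = true := hv
          rw [if_neg hv']
          have hvG : v ∈ G.getD u [] := hmem v (by simp)
          have hvk : (pyIdx G.length v) ≠ k := fun h => hv (h ▸ h2)
          have hrch : Rch G k s (pyIdx G.length v) := Rch.step hr hok hvG
          by_cases hvlt : (pyIdx G.length v) < G.length
          case neg =>
            rw [recDFS_sink G vis1 (pyIdx G.length v) fuel h1 (by omega)]
            obtain ⟨q1, q2, q3, q4, q5, q6⟩ :=
              iht vis1 (fun x hx => hmem x (by simp [hx])) h1 h2 h3
            refine ⟨q1, q2, q3, q4, q5, ?_⟩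
            intro x hx hxlt
            rcases List.mem_cons.mp hx with h | h
            · subst h; exact absurd hxlt hvlt
            · exact q6 x h hxlt
          have hcfv : (vis1.set (pyIdx G.length v) true).count false < fuel := by
            have := cf_set_lt vis1 (pyIdx G.length v) (by omega) (by simpa [marked] using hv)
            omega
          obtain ⟨p1, p2, p3, p4, p5, p6, p7⟩ :=
            ih vis1 (pyIdx G.length v) h1 h2 hcfv hrch (Or.inr hvk) hvlt
          have hcfmid : (recDFS G vis1 (pyIdx G.length v) fuel).count false ≤ fuel := by
            have := cf_set_lt vis1 (pyIdx G.length v) (by omega) (by simpa [marked] using hv)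
            omega
          obtain ⟨q1, q2, q3, q4, q5, q6⟩ :=
            iht (recDFS G vis1 (pyIdx G.length v) fuel) (fun x hx => hmem x (by simp [hx])) p1
              (p3 k h2) hcfmid
          have hcf2 : (vis1.set (pyIdx G.length v) true).count false ≤ vis1.count false := by
            have := cf_set_lt vis1 (pyIdx G.length v) (by omega) (by simpa [marked] using hv)
            omega
          refine ⟨q1, by omega, fun w hw => q3 w (p3 w hw), ?_, ?_, ?_⟩
          · intro w hw
            rcases q4 w hw with h | h
            · rcases p5 w h with h' | h'
              · exact Or.inl h'
              · exact Or.inr h'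
            · exact Or.inr h
          · intro w hw hwf
            by_cases hmid : marked (recDFS G vis1 (pyIdx G.length v) fuel) w = true
            · intro x hx hxlt
              exact q3 _ (p6 w hmid hwf x hx hxlt)
            · exact q5 w hw (by simpa using hmid)
          · intro x hx hxlt
            rcases List.mem_cons.mp hx with h | h
            · subst h; exact q3 _ p4
            · exact q6 x h hxlt
    obtain ⟨i1, i2, i3, i4, i5, i6⟩ :=
      inner (G.getD u []) (vis.set u true) (fun v hv => hv)
        (by simp [hlen]) (marked_set_mono vis u k hk) hcf'
    rw [hrec]
    refine ⟨i1, i2, ?_, ?_, ?_, ?_, ?_⟩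
    · intro w hw; exact i3 w (marked_set_mono vis u w hw)
    · exact i3 u (marked_set_self vis u (by omega))
    · intro w hw
      rcases i4 w hw with h | h
      · rcases marked_set_cases vis u w h with h' | h'
        · subst h'; exact Or.inr hr
        · exact Or.inl h'
      · exact Or.inr h
    · intro w hw hwf
      by_cases h0 : marked (vis.set u true) w = true
      · rcases marked_set_cases vis u w h0 with h' | h'
        · subst h'
          intro x hx hxlt
          exact i6 x hx hxlt
        · rw [h'] at hwf; cases hwf
      · exact i5 w hw (by simpa using h0)
    · intro x hx hxlt
      exact i6 x hx hxlt

-- ===== characterisation of port B (stack worklist, mark on push) =====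
lemma pushRow_post (G : List (List Int)) (l : List Int) (vis1 : List Bool) (st1 : List Nat)
    (hlen : vis1.length = G.length) :
    (pushRow G l (vis1, st1)).1.length = G.length ∧
    (pushRow G l (vis1, st1)).2.length + (pushRow G l (vis1, st1)).1.count false ≤
      st1.length + vis1.count false ∧
    (∀ w, marked vis1 w = true → marked (pushRow G l (vis1, st1)).1 w = true) ∧
    (∀ x ∈ st1, x ∈ (pushRow G l (vis1, st1)).2) ∧
    (∀ x ∈ (pushRow G l (vis1, st1)).2, x ∈ st1 ∨
      (marked (pushRow G l (vis1, st1)).1 x = true ∧ marked vis1 x = false ∧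
        x < G.length ∧ ∃ v ∈ l, x = pyIdx G.length v)) ∧
    (∀ v ∈ l, pyIdx G.length v < G.length →
      marked (pushRow G l (vis1, st1)).1 (pyIdx G.length v) = true) ∧
    (∀ w, marked (pushRow G l (vis1, st1)).1 w = true → marked vis1 w = true ∨
      (w ∈ (pushRow G l (vis1, st1)).2 ∧ w < G.length ∧ ∃ v ∈ l, w = pyIdx G.length v)) := by
  induction l generalizing vis1 st1 with
  | nil =>
    refine ⟨hlen, le_refl _, fun w hw => hw, fun x hx => hx, fun x hx => Or.inl hx,
      by simp, fun w hw => Or.inl hw⟩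
  | cons v t ih =>
    have hstep : pushRow G (v :: t) (vis1, st1) =
        pushRow G t (if pyIdx G.length v < G.length then
          (if vis1.getD (pyIdx G.length v) false then (vis1, st1)
            else (vis1.set (pyIdx G.length v) true, pyIdx G.length v :: st1))
          else (vis1, st1)) := by
      simp only [pushRow, List.foldl_cons]
    by_cases hrange : pyIdx G.length v < G.length
    · by_cases hv : marked vis1 (pyIdx G.length v) = true
      · have hv' : vis1.getD (pyIdx G.length v) false = true := hv
        rw [hstep, if_pos hrange, if_pos hv']
        obtain ⟨q1, q2, q3, q4, q5, q6, q7⟩ := ih vis1 st1 hlen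
        refine ⟨q1, q2, q3, q4, ?_, ?_, ?_⟩
        · intro x hx
          rcases q5 x hx with h | ⟨h1, h2, h3, w, hw, hxw⟩
          · exact Or.inl h
          · exact Or.inr ⟨h1, h2, h3, w, by simp [hw], hxw⟩
        · intro x hx hxlt
          rcases List.mem_cons.mp hx with h | h
          · subst h; exact q3 _ hv
          · exact q6 x h hxlt
        · intro w hw
          rcases q7 w hw with h | ⟨h1, h2, x, hx, hwx⟩
          · exact Or.inl h
          · exact Or.inr ⟨h1, h2, x, by simp [hx], hwx⟩
      · have hv' : ¬ vis1.getD (pyIdx G.length v) false = true := hv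
        rw [hstep, if_pos hrange, if_neg hv']
        have hlen' : (vis1.set (pyIdx G.length v) true).length = G.length := by simp [hlen]
        obtain ⟨q1, q2, q3, q4, q5, q6, q7⟩ :=
          ih (vis1.set (pyIdx G.length v) true) (pyIdx G.length v :: st1) hlen'
        have hcf : (vis1.set (pyIdx G.length v) true).count false < vis1.count false :=
          cf_set_lt vis1 _ (by omega) (by simpa [marked] using hv)
        have hmself : marked (vis1.set (pyIdx G.length v) true) (pyIdx G.length v) = true :=
          marked_set_self vis1 _ (by omega)
        refine ⟨q1, by simp only [List.length_cons] at q2; omega,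
          fun w hw => q3 w (marked_set_mono vis1 _ w hw),
          fun x hx => q4 x (by simp [hx]), ?_, ?_, ?_⟩
        · intro x hx
          rcases q5 x hx with h | ⟨h1, h2, h3, w, hw, hxw⟩
          · rcases List.mem_cons.mp h with h' | h'
            · subst h'
              exact Or.inr ⟨q3 _ hmself, by simpa [marked] using hv, hrange, v, by simp, rfl⟩
            · exact Or.inl h'
          · refine Or.inr ⟨h1, ?_, h3, w, by simp [hw], hxw⟩
            cases hmx : marked vis1 x with
            | false => rfl
            | true =>
              have hmx' := marked_set_mono vis1 (pyIdx G.length v) x hmx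
              rw [h2] at hmx'; cases hmx'
        · intro x hx hxlt
          rcases List.mem_cons.mp hx with h | h
          · subst h; exact q3 _ hmself
          · exact q6 x h hxlt
        · intro w hw
          rcases q7 w hw with h | ⟨h1, h2, x, hx, hwx⟩
          · rcases marked_set_cases vis1 _ w h with h' | h'
            · subst h'
              exact Or.inr ⟨q4 _ (by simp), hrange, v, by simp, rfl⟩
            · exact Or.inl h'
          · exact Or.inr ⟨h1, h2, x, by simp [hx], hwx⟩
    · rw [hstep, if_neg hrange]
      obtain ⟨q1, q2, q3, q4, q5, q6, q7⟩ := ih vis1 st1 hlen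
      refine ⟨q1, q2, q3, q4, ?_, ?_, ?_⟩
      · intro x hx
        rcases q5 x hx with h | ⟨h1, h2, h3, w, hw, hxw⟩
        · exact Or.inl h
        · exact Or.inr ⟨h1, h2, h3, w, by simp [hw], hxw⟩
      · intro x hx hxlt
        rcases List.mem_cons.mp hx with h | h
        · subst h; exact absurd hxlt hrange
        · exact q6 x h hxlt
      · intro w hw
        rcases q7 w hw with h | ⟨h1, h2, x, hx, hwx⟩
        · exact Or.inl h
        · exact Or.inr ⟨h1, h2, x, by simp [hx], hwx⟩

lemma dfsLoop_post (G : List (List Int)) (k s : Nat) :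
    ∀ (fuel : Nat) (vis : List Bool) (stack : List Nat),
      vis.length = G.length →
      marked vis k = true →
      stack.length + vis.count false ≤ fuel →
      (∀ x ∈ stack, (x = s ∨ x ≠ k) ∧ Rch G k s x ∧ x < G.length) →
      (∀ w, marked vis w = true → w = k ∨ Rch G k s w) →
      (∀ w, marked vis w = true → (w = s ∨ w ≠ k) → w ∈ stack ∨ Closed G vis w) →
      (dfsLoop G fuel vis stack).length = G.length ∧
      (∀ w, marked vis w = true → marked (dfsLoop G fuel vis stack) w = true) ∧
      (∀ w, marked (dfsLoop G fuel vis stack) w = true → w = k ∨ Rch G k s w) ∧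
      (∀ w, marked (dfsLoop G fuel vis stack) w = true → (w = s ∨ w ≠ k) →
        Closed G (dfsLoop G fuel vis stack) w) := by
  intro fuel
  induction fuel with
  | zero =>
    intro vis stack hlen hk hf hst hsound hclos
    have hnil : stack = [] := by
      cases stack with
      | nil => rfl
      | cons a t => simp at hf
    subst hnil
    refine ⟨hlen, fun w hw => hw, hsound, ?_⟩
    intro w hw hok
    rcases hclos w hw hok with h | h
    · simp at h
    · exact h
  | succ fuel ih =>
    intro vis stack hlen hk hf hst hsound hclos
    cases stack with
    | nil =>
      refine ⟨hlen, fun w hw => hw, hsound, ?_⟩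
      intro w hw hok
      rcases hclos w hw hok with h | h
      · simp at h
      · exact h
    | cons u rest =>
      obtain ⟨hoku, hru, hultn⟩ := hst u (by simp)
      have heq : dfsLoop G (fuel + 1) vis (u :: rest) =
          dfsLoop G fuel (pushRow G (G.getD u []) (vis, rest)).1
            (pushRow G (G.getD u []) (vis, rest)).2 := rfl
      obtain ⟨q1, q2, q3, q4, q5, q6, q7⟩ := pushRow_post G (G.getD u []) vis rest hlen
      have hk' : marked (pushRow G (G.getD u []) (vis, rest)).1 k = true := q3 k hk
      have hst' : ∀ x ∈ (pushRow G (G.getD u []) (vis, rest)).2,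
          (x = s ∨ x ≠ k) ∧ Rch G k s x ∧ x < G.length := by
        intro x hx
        rcases q5 x hx with h | ⟨_, hfresh, hxlt, v, hv, hxv⟩
        · exact hst x (by simp [h])
        · refine ⟨Or.inr fun he => ?_, hxv ▸ Rch.step hru hoku hv, hxlt⟩
          rw [he] at hfresh; rw [hk] at hfresh; cases hfresh
      have hsound' : ∀ w, marked (pushRow G (G.getD u []) (vis, rest)).1 w = true →
          w = k ∨ Rch G k s w := by
        intro w hw
        rcases q7 w hw with h | ⟨_, _, v, hv, hwv⟩
        · exact hsound w h
        · exact Or.inr (hwv ▸ Rch.step hru hoku hv)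
      have hclos' : ∀ w, marked (pushRow G (G.getD u []) (vis, rest)).1 w = true →
          (w = s ∨ w ≠ k) → w ∈ (pushRow G (G.getD u []) (vis, rest)).2 ∨
            Closed G (pushRow G (G.getD u []) (vis, rest)).1 w := by
        intro w hw hok
        by_cases hwold : marked vis w = true
        · rcases hclos w hwold hok with h | h
          · rcases List.mem_cons.mp h with h' | h'
            · subst h'
              exact Or.inr fun v hv hvlt => q6 v hv hvlt
            · exact Or.inl (q4 w h')
          · exact Or.inr fun v hv hvlt => q3 _ (h v hv hvlt)
        · rcases q7 w hw with h | ⟨h1, _, _⟩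
          · exact absurd h hwold
          · exact Or.inl h1
      have hf' : (pushRow G (G.getD u []) (vis, rest)).2.length +
          (pushRow G (G.getD u []) (vis, rest)).1.count false ≤ fuel := by
        simp only [List.length_cons] at hf
        omega
      obtain ⟨c1, c2, c3, c4⟩ := ih _ _ q1 hk' hf' hst' hsound' hclos'
      rw [heq]
      exact ⟨c1, fun w hw => c2 w (q3 w hw), c3, c4⟩

-- final check of Source B: all(visited) over a list of booleans equals the indexed range scan
lemma all_id_eq (l : List Bool) :
    l.all (fun b => b) = (List.range l.length).all (fun i => l.getD i false) := by
  induction l with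
  | nil => simp
  | cons b t ih =>
    simp only [List.length_cons, List.range_succ_eq_map, List.all_cons, List.all_map,
      Function.comp_def, List.getD_cons_zero, List.getD_cons_succ]
    rw [ih]

lemma ports_agree (G : List (List Int)) (k s : Nat)
    (hk : k < G.length) (hs : s < G.length) :
    (List.range G.length).all (fun i =>
      (recDFS G ((List.replicate G.length false).set k true) s (G.length + 1)).getD i false) =
    (dfsLoop G (G.length + 1) (((List.replicate G.length false).set k true).set s true)
      [s]).all (fun b => b) := by
  have hlenA : ((List.replicate G.length false).set k true).length = G.length := by simp
  have hm0 := marked_replicate_set G.length k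
  have hk0 : marked ((List.replicate G.length false).set k true) k = true :=
    (hm0 k).mpr ⟨rfl, hk⟩
  have hcfA : (((List.replicate G.length false).set k true).set s true).count false <
      G.length + 1 := by
    have h1 : (((List.replicate G.length false).set k true).set s true).count false ≤
        (((List.replicate G.length false).set k true).set s true).length :=
      List.count_le_length
    simp only [List.length_set, hlenA] at h1
    omega
  obtain ⟨a1, a2, a3, a4, a5, a6, a7⟩ :=
    recDFS_post G k s (G.length + 1) _ s hlenA hk0 hcfA Rch.start (Or.inl rfl) hs
  have hAchar : ∀ w,
      marked (recDFS G ((List.replicate G.length false).set k true) s (G.length + 1)) w = true ↔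
      (w = k ∨ (Rch G k s w ∧ w < G.length)) := by
    intro w
    constructor
    · intro hw
      rcases a5 w hw with h | h
      · exact Or.inl ((hm0 w).mp h).1
      · exact Or.inr ⟨h, by have := marked_lt _ _ hw; omega⟩
    · rintro (h | ⟨h, hwlt⟩)
      · exact h ▸ a3 k hk0
      · revert hwlt
        induction h with
        | start => exact fun _ => a4
        | @step u v hru hoku hvm ihm =>
          intro hjlt
          have hult : u < G.length := by
            by_contra hc
            rw [List.getD_eq_default G [] (by omega)] at hvm
            simp at hvm
          have hclosed : Closed G
              (recDFS G ((List.replicate G.length false).set k true) s (G.length + 1)) u := by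
            rcases hoku with hus | hunk
            · exact hus ▸ a7
            · by_cases hm : marked ((List.replicate G.length false).set k true) u = true
              · exact absurd ((hm0 u).mp hm).1 hunk
              · exact a6 u (ihm hult) (by simpa using hm)
          exact hclosed _ hvm hjlt
  have hlenB : (((List.replicate G.length false).set k true).set s true).length = G.length := by
    simp
  have hkB : marked (((List.replicate G.length false).set k true).set s true) k = true :=
    marked_set_mono _ s k hk0
  have hsB : marked (((List.replicate G.length false).set k true).set s true) s = true :=
    marked_set_self _ s (by omega)
  have hfB : ([s] : List Nat).length +
      (((List.replicate G.length false).set k true).set s true).count false ≤ G.length + 1 := by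
    simp only [List.length_cons, List.length_nil]
    omega
  obtain ⟨b1, b2, b3, b4⟩ :=
    dfsLoop_post G k s (G.length + 1) _ [s] hlenB hkB hfB
      (by intro x hx
          simp only [List.mem_cons, List.not_mem_nil, or_false] at hx
          subst hx; exact ⟨Or.inl rfl, Rch.start, hs⟩)
      (by intro w hw
          rcases marked_set_cases _ s w hw with h | h
          · exact Or.inr (h ▸ Rch.start)
          · exact Or.inl ((hm0 w).mp h).1)
      (by intro w hw hok
          rcases marked_set_cases _ s w hw with h | h
          · exact Or.inl (by simp [h])
          · rcases hok with h' | h'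
            · exact Or.inl (by simp [h'])
            · exact absurd ((hm0 w).mp h).1 h')
  have hBchar : ∀ w,
      marked (dfsLoop G (G.length + 1) (((List.replicate G.length false).set k true).set s true)
        [s]) w = true ↔ (w = k ∨ (Rch G k s w ∧ w < G.length)) := by
    intro w
    constructor
    · intro hw
      rcases b3 w hw with h | h
      · exact Or.inl h
      · exact Or.inr ⟨h, by have := marked_lt _ _ hw; omega⟩
    · rintro (h | ⟨h, hwlt⟩)
      · exact h ▸ b2 k hkB
      · revert hwlt
        induction h with
        | start => exact fun _ => b2 s hsB
        | @step u v hru hoku hvm ihm =>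
          intro hjlt
          have hult : u < G.length := by
            by_contra hc
            rw [List.getD_eq_default G [] (by omega)] at hvm
            simp at hvm
          exact b4 u (ihm hult) hoku _ hvm hjlt
  have hAB : ∀ w,
      marked (recDFS G ((List.replicate G.length false).set k true) s (G.length + 1)) w =
      marked (dfsLoop G (G.length + 1) (((List.replicate G.length false).set k true).set s true)
        [s]) w := by
    intro w
    have hiff := (hAchar w).trans (hBchar w).symm
    cases hA' : marked (recDFS G ((List.replicate G.length false).set k true) s (G.length + 1)) w <;>
      cases hB' : marked (dfsLoop G (G.length + 1)
        (((List.replicate G.length false).set k true).set s true) [s]) w <;> simp_all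
  rw [all_id_eq, b1]
  exact congrArg (List.range G.length).all (funext fun i => hAB i)

-- ===== VERDICT (by name: the statement is the Claim_ definition above) =====
theorem DFS_spec : Claim_equal_DFS := by
  intro G idx _ hpre
  obtain ⟨hn, hi0, hiN, hi2, _⟩ := hpre
  unfold Spec_DFS
  have hk : pyIdx G.length idx < G.length := by unfold pyIdx; split <;> omega
  by_cases h0 : idx = 0
  · subst h0
    have h2n : 2 ≤ G.length := hi2 rfl
    have key := ports_agree G (pyIdx G.length 0) 1 hk (by omega)
    simp only [DFS, DFS_alt]
    simpa using key
  · have key := ports_agree G (pyIdx G.length idx) 0 hk (by omega)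
    simp only [DFS, DFS_alt]
    rw [if_pos h0, if_neg h0]
    exact key
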